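-- pv_equiv track=rewrite | github.com/lasting-yang/FridaAutoHook | generatehookcode.py | getArgType
-- ===== SOURCE A (Python) =====
-- def getArgType(argType = ""):
--     chType = argType[0]
--     standardType = ["Z", "B", "C", "S", "I", "J", "F", "D"]
--     objectType = ["L"]
--     arrayType = ["["]
--     if chType in standardType:
--         return chType
--     elif chType in objectType:
--         endPos = argType.find(";")
--         typeName = argType[0 : endPos + 1]
--         return typeName
--     elif chType in arrayType:
--         endString = argType[1:]
--         typeName = "[" + getArgType(endString)
--         return typeName
--
--     return ""
-- ===== SOURCE B (Python) =====
-- def getArgType(argType = ""):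
--     rest = argType.lstrip('[')
--     prefix = '[' * (len(argType) - len(rest))
--     ch = rest[0]  # IndexError on empty / bracket-only input, as in A
--     if ch == 'L':
--         return prefix + rest[:rest.find(';') + 1]
--     return prefix + (ch if ch in "ZBCSIJFD" else "")
-- ===== Notes on version B (the rewrite author's own statement) =====
-- stated objective: alternative
-- what changed: Replaces A's recursion (one call per leading '[') with a flat three-stage computation: lstrip the leading brackets, rebuild the prefix by character repetition, and classify the single remaining base character with a string-membership test.
import Mathlib
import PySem

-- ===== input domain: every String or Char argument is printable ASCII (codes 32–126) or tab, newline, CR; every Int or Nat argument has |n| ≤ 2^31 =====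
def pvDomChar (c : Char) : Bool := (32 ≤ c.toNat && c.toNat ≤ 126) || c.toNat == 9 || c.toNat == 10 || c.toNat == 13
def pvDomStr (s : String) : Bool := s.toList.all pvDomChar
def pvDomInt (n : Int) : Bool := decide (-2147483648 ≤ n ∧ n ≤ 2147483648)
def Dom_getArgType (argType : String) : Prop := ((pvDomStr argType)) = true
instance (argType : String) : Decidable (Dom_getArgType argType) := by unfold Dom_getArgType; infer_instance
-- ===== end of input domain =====

-- B replaces A's per-bracket recursion with a flat lstrip + prefix-rebuild + one base-case test (alternative decomposition, same cost).

-- ===== PORT A =====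
-- A, step for step on the code points: index 0, the three membership tests in order,
-- find ';' and slice [0:endPos+1] for objects, "[" + recursive call for arrays, "" otherwise.
-- On [] (Python: IndexError on argType[0], excluded by Pre_) the helper returns [].
def getArgTypeGoA : List Char → List Char
  | [] => []
  | c :: rest =>
    if c ∈ ['Z', 'B', 'C', 'S', 'I', 'J', 'F', 'D'] then [c]
    else if c ∈ ['L'] then
      PySem.List.slice (c :: rest) (some 0) (some (PySem.Chars.find (c :: rest) [';'] + 1))
    else if c ∈ ['['] then '[' :: getArgTypeGoA rest
    else []

def getArgType (argType : String) : String := String.ofList (getArgTypeGoA argType.toList)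

-- ===== PORT B =====
-- B's three stages on the code points: rest = argType.lstrip('[') (ported by hand as
-- dropWhile (= '['), exact: lstrip with a one-char set drops exactly the leading such chars);
-- prefix = '[' * (len - len rest) (List.replicate); then index rest[0] (Python: IndexError
-- on [], excluded by Pre_; the helper returns just the prefix there) and classify it.
def getArgTypeAltCore (cs : List Char) : List Char :=
  let rest := cs.dropWhile (fun c => c = '[')
  let pre := List.replicate (cs.length - rest.length) '['
  match rest with
  | [] => pre
  | ch :: _ =>
    if ch = 'L' then
      pre ++ PySem.List.slice rest none (some (PySem.Chars.find rest [';'] + 1))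
    else
      pre ++ (if ch ∈ "ZBCSIJFD".toList then [ch] else [])

def getArgType_alt (argType : String) : String := String.ofList (getArgTypeAltCore argType.toList)

-- ===== PRECONDITION & SPEC =====
-- Pre_ excludes exactly the inputs ("" and bracket-only strings) on which the Python A
-- (and B alike) raises IndexError when indexing the first non-'[' character.
def Pre_getArgType (argType : String) : Prop := argType.toList.any (fun c => c ≠ '[') = true
instance (argType : String) : Decidable (Pre_getArgType argType) := by unfold Pre_getArgType; infer_instance

def pvWitness_getArgType : String := "[Lfoo;"

def Spec_getArgType (argType : String) (out : String) : Prop := out = getArgType_alt argType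
instance (argType : String) (out : String) : Decidable (Spec_getArgType argType out) := by unfold Spec_getArgType; infer_instance

-- ===== CLAIM (what is proved, stated in full; the proofs are below) =====
def Claim_equal_getArgType : Prop := ∀ (argType : String), Dom_getArgType argType → Pre_getArgType argType → Spec_getArgType argType (getArgType argType)

-- ===== LEMMAS AND PROOFS =====
theorem altCore_cons_bracket (cs : List Char) :
    getArgTypeAltCore ('[' :: cs) = '[' :: getArgTypeAltCore cs := by
  have hlen : (cs.dropWhile (fun c => c = '[')).length ≤ cs.length :=
    List.length_dropWhile_le _ _
  unfold getArgTypeAltCore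
  have hrep : List.replicate (cs.length + 1 - (cs.dropWhile (fun c => c = '[')).length) '['
      = '[' :: List.replicate (cs.length - (cs.dropWhile (fun c => c = '[')).length) '[' := by
    rw [Nat.succ_sub hlen]; rfl
  simp only [List.dropWhile_cons, List.length_cons, decide_true, if_true]
  rcases hd : cs.dropWhile (fun c => c = '[') with _ | ⟨ch, rest⟩
  · simp [List.replicate_succ]
  · rw [hd] at hrep
    simp only [List.length_cons] at hrep ⊢
    have hrep' : List.replicate (cs.length - rest.length) '['
        = '[' :: List.replicate (cs.length - (rest.length + 1)) '[' := by
      rw [show cs.length - rest.length = cs.length + 1 - (rest.length + 1) from by omega]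
      exact hrep
    split <;> simp [hrep']

theorem getArgType_core_eq (cs : List Char) : getArgTypeGoA cs = getArgTypeAltCore cs := by
  induction cs with
  | nil => rfl
  | cons c t ih =>
    by_cases h1 : c = '['
    · subst h1
      have hA : getArgTypeGoA ('[' :: t) = '[' :: getArgTypeGoA t := by
        simp [getArgTypeGoA]
      rw [hA, ih, altCore_cons_bracket]
    · have hd : (c :: t).dropWhile (fun c => c = '[') = c :: t := by
        simp [h1]
      by_cases h2 : c ∈ ['Z', 'B', 'C', 'S', 'I', 'J', 'F', 'D']
      · have h3 : c ≠ 'L' := by rintro rfl; simp at h2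
        have h4 : c ∈ "ZBCSIJFD".toList := by simpa using h2
        simp [getArgTypeGoA, getArgTypeAltCore, hd, h2, h3]
      · by_cases h3 : c = 'L'
        · subst h3
          simp [getArgTypeGoA, getArgTypeAltCore, hd, h2]
        · have h4 : c ∉ "ZBCSIJFD".toList := by
            intro hmem; apply h2; simpa using hmem
          simp [getArgTypeGoA, getArgTypeAltCore, hd, h1, h2, h3]

-- ===== VERDICT (by name: the statement is the Claim_ definition above) =====
theorem getArgType_spec : Claim_equal_getArgType := by
  intro argType _ _
  unfold Spec_getArgType getArgType getArgType_alt
  rw [getArgType_core_eq]
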